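-- pv_equiv track=rewrite | github.com/devSillasReis/VideoManager | video_run.py | show_format_time
-- ===== SOURCE A (Python) =====
-- def show_format_time(time_variable):
--     str_time = ''
--
--     if len(time_variable) < 6:
--         full_time = '00' + time_variable
--     else:
--         full_time = time_variable
--
--     for i in range(len(full_time)):
--         str_time = str_time + full_time[i]
--         if(i%2 != 0 and i != len(full_time)-1):
--             str_time = str_time + ':'
--
--     return str_time
-- ===== SOURCE B (Python) =====
-- def show_format_time(time_variable):
--     if len(time_variable) < 6:
--         full_time = '00' + time_variable
--     else:
--         full_time = time_variable
--     return ':'.join([full_time[i:i+2] for i in range(0, len(full_time), 2)])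
-- ===== Notes on version B (the rewrite author's own statement) =====
-- stated objective: simpler
-- what changed: Replaces the per-character accumulator loop with its index-parity colon branch by padding once, slicing the string into 2-character chunks with a stride-2 range, and joining the chunks with colon separators.
import Mathlib
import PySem

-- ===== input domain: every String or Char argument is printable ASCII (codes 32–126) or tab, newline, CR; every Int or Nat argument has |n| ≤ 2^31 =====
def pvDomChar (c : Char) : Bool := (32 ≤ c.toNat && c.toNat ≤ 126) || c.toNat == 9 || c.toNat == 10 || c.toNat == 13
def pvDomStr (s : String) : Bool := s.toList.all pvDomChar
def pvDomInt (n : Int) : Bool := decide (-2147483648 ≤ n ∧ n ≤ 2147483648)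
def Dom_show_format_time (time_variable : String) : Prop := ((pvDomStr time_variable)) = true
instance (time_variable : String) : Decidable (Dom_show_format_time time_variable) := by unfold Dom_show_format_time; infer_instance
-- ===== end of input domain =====

-- B pads once, slices the string into 2-character chunks and joins them with colon separators,
-- replacing A's per-character accumulator loop with its index-parity colon branch (objective: simpler).

-- ===== PORT A =====
def show_format_time (time_variable : String) : String :=
  let t := time_variable.toList
  let full_time : List Char := if t.length < 6 then '0' :: '0' :: t else t
  String.ofList ((List.range full_time.length).foldl
    (fun str_time i =>
      let str_time := str_time ++ [full_time.getD i ' ']   -- full_time[i]; i < len, so never raises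
      if i % 2 ≠ 0 ∧ i ≠ full_time.length - 1 then str_time ++ [':'] else str_time)
    [])

-- ===== PORT B =====
def show_format_time_alt (time_variable : String) : String :=
  let t := time_variable.toList
  let full_time : List Char := if t.length < 6 then '0' :: '0' :: t else t
  String.ofList (PySem.Chars.join [':']
    ((PySem.List.pyRange 0 (full_time.length : Int) 2).map
      (fun i => PySem.List.slice full_time (some i) (some (i + 2)))))

-- ===== PRECONDITION & SPEC =====
def Spec_show_format_time (time_variable : String) (out : String) : Prop := out = show_format_time_alt time_variable
instance (time_variable : String) (out : String) : Decidable (Spec_show_format_time time_variable out) := by unfold Spec_show_format_time; infer_instance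

-- ===== CLAIM (what is proved, stated in full; the proofs are below) =====
def Claim_equal_show_format_time : Prop := ∀ (time_variable : String), Dom_show_format_time time_variable → Spec_show_format_time time_variable (show_format_time time_variable)

-- ===== LEMMAS AND PROOFS =====

/-- Proof-side view of B's chunk list: the string split into 2-char groups. -/
def pvChunk2 : List Char → List (List Char)
  | [] => []
  | [c] => [[c]]
  | a :: b :: rest => [a, b] :: pvChunk2 rest

theorem pvChunk2_eq_nil_iff (l : List Char) : pvChunk2 l = [] ↔ l = [] := by
  cases l with
  | nil => simp [pvChunk2]
  | cons a t => cases t <;> simp [pvChunk2]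

/-- One loop iteration of A appends this block. -/
def pvTerm (l : List Char) (i : Nat) : List Char :=
  l.getD i ' ' :: (if i % 2 ≠ 0 ∧ i ≠ l.length - 1 then [':'] else [])

theorem pvFoldA (l : List Char) :
    (List.range l.length).foldl
      (fun str_time i =>
        let str_time := str_time ++ [l.getD i ' ']
        if i % 2 ≠ 0 ∧ i ≠ l.length - 1 then str_time ++ [':'] else str_time)
      [] = (List.range l.length).flatMap (pvTerm l) := by
  have h : (fun (str_time : List Char) (i : Nat) =>
        let str_time := str_time ++ [l.getD i ' ']
        if i % 2 ≠ 0 ∧ i ≠ l.length - 1 then str_time ++ [':'] else str_time)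
      = fun str_time i => str_time ++ pvTerm l i := by
    funext acc i
    by_cases h1 : i % 2 = 0
    · simp [pvTerm, h1]
    · by_cases h2 : i = l.length - 1
      · simp [pvTerm, h2]
      · simp [pvTerm, h1, h2]
  rw [h, PySem.List.foldl_append_eq_flatMap]
  simp

theorem pvFlat_eq_join (l : List Char) :
    (List.range l.length).flatMap (pvTerm l) = PySem.Chars.join [':'] (pvChunk2 l) := by
  induction l using pvChunk2.induct with
  | case1 => simp [pvChunk2, PySem.Chars.join_nil]
  | case2 c => simp [pvChunk2, PySem.Chars.join_singleton, pvTerm, List.range_succ]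
  | case3 a b rest ih =>
    have hlen : (a :: b :: rest).length = rest.length + 2 := by simp
    have hrange : List.range (rest.length + 2)
        = 0 :: 1 :: (List.range rest.length).map (fun k => k + 2) := by
      simp [List.range_succ_eq_map, List.map_map, Function.comp_def]
    have hterm : ∀ k ∈ List.range rest.length,
        pvTerm (a :: b :: rest) (k + 2) = pvTerm rest k := by
      intro k hk
      rw [List.mem_range] at hk
      have hgd : (a :: b :: rest).getD (k + 2) ' ' = rest.getD k ' ' := by
        simp
      simp only [pvTerm, hlen, hgd]
      congr 1
      by_cases h1 : k % 2 = 0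
      · have h1' : (k + 2) % 2 = 0 := by omega
        simp [h1, h1']
      · have h1' : (k + 2) % 2 ≠ 0 := by omega
        by_cases h2 : k = rest.length - 1
        · have h2' : k + 2 = rest.length + 2 - 1 := by omega
          simp [h2]
          omega
        · have h2' : k + 2 ≠ rest.length + 2 - 1 := by omega
          simp [h1, h2]
          omega
    rw [hlen, hrange]
    simp only [List.flatMap_cons, List.flatMap_map]
    rw [List.flatMap_congr hterm, ih]
    cases hrest : rest with
    | nil =>
      simp [pvChunk2, pvTerm, PySem.Chars.join_singleton]
    | cons r rs =>
      subst hrest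
      cases hch : pvChunk2 (r :: rs) with
      | nil => exact absurd ((pvChunk2_eq_nil_iff _).mp hch) (by simp)
      | cons q qs =>
        rw [pvChunk2, hch, PySem.Chars.join_cons_cons]
        have h0 : pvTerm (a :: b :: r :: rs) 0 = [a] := by
          simp [pvTerm]
        have h1 : pvTerm (a :: b :: r :: rs) 1 = [b, ':'] := by
          have hl : (a :: b :: r :: rs).length = rs.length + 3 := by simp
          simp [pvTerm, hl]
        rw [h0, h1]
        simp
  
theorem pvChunks_eq (l : List Char) :
    (PySem.List.pyRange 0 (l.length : Int) 2).map
      (fun i => PySem.List.slice l (some i) (some (i + 2))) = pvChunk2 l := by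
  rw [PySem.List.pyRange_of_pos 0 (l.length : Int) (by norm_num)]
  have hm : (if (0 : Int) < (l.length : Int) then (((l.length : Int) - 0 + 2 - 1) / 2).toNat else 0)
      = (l.length + 1) / 2 := by
    by_cases h : 0 < l.length
    · have : (0 : Int) < (l.length : Int) := by exact_mod_cast h
      simp only [this, if_pos]
      omega
    · have hl : l.length = 0 := by omega
      simp [hl]
  rw [hm, List.map_map]
  have hsl : ∀ k ∈ List.range ((l.length + 1) / 2),
      ((fun i => PySem.List.slice l (some i) (some (i + 2))) ∘ fun k : Nat => (0 : Int) + 2 * (k : Int)) k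
        = (l.drop (2 * k)).take 2 := by
    intro k _
    show PySem.List.slice l (some ((0 : Int) + 2 * (k : Int))) (some ((0 : Int) + 2 * (k : Int) + 2)) = _
    have h1 : (0 : Int) + 2 * (k : Int) = ((2 * k : Nat) : Int) := by push_cast; ring
    have h2 : (0 : Int) + 2 * (k : Int) + 2 = ((2 * k : Nat) : Int) + ((2 : Nat) : Int) := by push_cast; ring
    rw [h2, h1, PySem.List.slice_natCast_add]
  rw [List.map_congr_left hsl]
  clear hm hsl
  induction l using pvChunk2.induct with
  | case1 => simp [pvChunk2]
  | case2 c => simp [pvChunk2]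
  | case3 a b rest ih =>
    have hlen : ((a :: b :: rest).length + 1) / 2 = (rest.length + 1) / 2 + 1 := by
      simp; omega
    rw [hlen, List.range_succ_eq_map, List.map_cons, List.map_map]
    have hdrop : ∀ k : Nat, (a :: b :: rest).drop (2 * (k + 1)) = rest.drop (2 * k) := by
      intro k
      rw [show 2 * (k + 1) = 2 * k + 1 + 1 by ring]
      simp
    have : ((List.range ((rest.length + 1) / 2)).map
          ((fun k : Nat => ((a :: b :: rest).drop (2 * k)).take 2) ∘ Nat.succ))
        = (List.range ((rest.length + 1) / 2)).map (fun k => (rest.drop (2 * k)).take 2) := by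
      apply List.map_congr_left
      intro k _
      simp only [Function.comp_apply, Nat.succ_eq_add_one, hdrop k]
    rw [this, ih]
    simp [pvChunk2]

theorem pvMain (l : List Char) :
    (List.range l.length).foldl
      (fun str_time i =>
        let str_time := str_time ++ [l.getD i ' ']
        if i % 2 ≠ 0 ∧ i ≠ l.length - 1 then str_time ++ [':'] else str_time)
      []
    = PySem.Chars.join [':']
        ((PySem.List.pyRange 0 (l.length : Int) 2).map
          (fun i => PySem.List.slice l (some i) (some (i + 2)))) := by
  rw [pvFoldA, pvFlat_eq_join, pvChunks_eq]

-- ===== VERDICT (by name: the statement is the Claim_ definition above) =====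
theorem show_format_time_spec : Claim_equal_show_format_time := by
  intro t _
  unfold Spec_show_format_time show_format_time show_format_time_alt
  exact congrArg String.ofList (pvMain _)
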